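-- pv_equiv track=rewrite | github.com/ulyana-3107/Studying | LC/num_2256.py | average_diff
-- ===== SOURCE A (Python) =====
-- from math import ceil
--
-- def split_arr(arr, n):
--     for i in range(n):
--         a, b = i + 1, i + 1
--         a_, b_ = arr[: a], arr[b:]
--         yield(a_, b_)
--
-- def average_diff(arr) -> int:
--     n = len(arr)
--     if n < 2:
--         return int(False)
--     res, res_ = split_arr(arr, n), []
--     for i in range(n):
--         next_ = next(res)
--         a, b, a_, b_ = next_[0], next_[1], len(next_[0]), len(next_[1])
--         _a = ceil(sum(a)//a_) if a_ > 0 else 0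
--         _b = ceil(sum(b)//b_) if b_ > 0 else 0
--         res_.append(abs(_a - _b))
--     m = 0
--     for i_ in range(1, n):
--         if res_[i_] < res_[m]:
--             m = i_
--     return m
-- ===== SOURCE B (Python) =====
-- def average_diff(arr) -> int:
--     n = len(arr)
--     total = sum(arr)
--     pre = 0
--     best_i, best_v = 0, None
--     for i, x in enumerate(arr):
--         pre += x
--         a = pre // (i + 1)
--         rest = n - i - 1
--         b = (total - pre) // rest if rest else 0
--         d = abs(a - b)
--         if best_v is None or d < best_v:
--             best_i, best_v = i, d
--     return best_i
-- ===== Notes on version B (the rewrite author's own statement) =====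
-- stated objective: faster
-- what changed: B replaces A's per-split slicing and summing (quadratic) and its separate argmin pass by a single left-to-right pass that maintains a running prefix sum and the current best index, computing each split's two floor-averages in O(1).
import Mathlib
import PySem

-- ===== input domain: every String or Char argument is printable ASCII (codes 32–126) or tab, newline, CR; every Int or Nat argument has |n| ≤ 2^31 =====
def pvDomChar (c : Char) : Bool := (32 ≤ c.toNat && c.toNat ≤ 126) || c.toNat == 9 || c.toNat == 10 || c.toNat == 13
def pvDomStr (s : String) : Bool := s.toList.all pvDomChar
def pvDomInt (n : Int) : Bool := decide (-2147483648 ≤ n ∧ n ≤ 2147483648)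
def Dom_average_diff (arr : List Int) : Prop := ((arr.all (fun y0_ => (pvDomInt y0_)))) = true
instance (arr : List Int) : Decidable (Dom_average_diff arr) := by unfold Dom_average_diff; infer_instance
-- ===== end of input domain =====

-- B replaces A's per-split slicing/summing and separate argmin pass by one pass with a running
-- prefix sum (objective: faster).

-- ===== PORT A =====
-- generator split_arr(arr, n): the list of (arr[:i+1], arr[i+1:]) for i in range(n)
def split_arr (arr : List Int) (n : Int) : List (List Int × List Int) :=
  (PySem.List.pyRange 0 n 1).map (fun i =>
    (PySem.List.slice arr none (some (i + 1)), PySem.List.slice arr (some (i + 1)) none))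

-- body of A's final argmin loop: 'if res_[i_] < res_[m]: m = i_' (indices always in range in A)
def astep (res_ : List Int) (m i_ : Int) : Int :=
  if PySem.List.pyGetD res_ i_ 0 < PySem.List.pyGetD res_ m 0 then i_ else m

-- literal port of A; ceil(x) on an int x is x, so 'ceil(sum(a)//a_)' is plain floor division
def average_diff (arr : List Int) : Int :=
  let n : Int := arr.length
  if n < 2 then 0
  else
    let res := split_arr arr n
    let res_ := res.foldl (fun res_ next_ =>
      let a := next_.1
      let b := next_.2
      let a_ : Int := a.length
      let b_ : Int := b.length
      let _a : Int := if a_ > 0 then PySem.Int.floordiv a.sum a_ else 0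
      let _b : Int := if b_ > 0 then PySem.Int.floordiv b.sum b_ else 0
      res_ ++ [|_a - _b|]) []
    (PySem.List.pyRange 1 n 1).foldl (astep res_) 0

-- ===== PORT B =====
-- body of B's single loop: state (pre, best_i, best_v), element (i, x)
def bstep (n total : Int) (s : Int × Int × Option Int) (ix : Int × Int) : Int × Int × Option Int :=
  let pre := s.1 + ix.2
  let a := PySem.Int.floordiv pre (ix.1 + 1)
  let rest := n - ix.1 - 1
  let b := if rest ≠ 0 then PySem.Int.floordiv (total - pre) rest else 0
  let d := |a - b|
  match s.2.2 with
  | none => (pre, ix.1, some d)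
  | some bv => if d < bv then (pre, ix.1, some d) else (pre, s.2.1, some bv)

def average_diff_alt (arr : List Int) : Int :=
  let n : Int := arr.length
  let total : Int := arr.sum
  ((PySem.List.enumerate arr).foldl (bstep n total) (0, 0, none)).2.1

-- ===== PRECONDITION & SPEC =====
def Spec_average_diff (arr : List Int) (out : Int) : Prop := out = average_diff_alt arr
instance (arr : List Int) (out : Int) : Decidable (Spec_average_diff arr out) := by unfold Spec_average_diff; infer_instance

-- ===== CLAIM (what is proved, stated in full; the proofs are below) =====
def Claim_equal_average_diff : Prop := ∀ (arr : List Int), Dom_average_diff arr → Spec_average_diff arr (average_diff arr)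

-- ===== LEMMAS AND PROOFS =====

-- the split-difference value at index j (0 ≤ j < arr.length)
def dv (arr : List Int) (j : Nat) : Int :=
  let pre := (arr.take (j + 1)).sum
  let a := PySem.Int.floordiv pre ((j : Int) + 1)
  let rest := (arr.length : Int) - (j : Int) - 1
  let b := if rest ≠ 0 then PySem.Int.floordiv (arr.sum - pre) rest else 0
  |a - b|

-- A's res_ list holds dv at every in-range index
lemma resList_pyGetD (arr : List Int) (i : Nat) (hi : i < arr.length) :
    PySem.List.pyGetD
      ((split_arr arr arr.length).foldl (fun res_ next_ =>
        let a := next_.1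
        let b := next_.2
        let a_ : Int := a.length
        let b_ : Int := b.length
        let _a : Int := if a_ > 0 then PySem.Int.floordiv a.sum a_ else 0
        let _b : Int := if b_ > 0 then PySem.Int.floordiv b.sum b_ else 0
        res_ ++ [|_a - _b|]) []) (i : Int) 0 = dv arr i := by
  unfold split_arr
  rw [List.foldl_map, PySem.List.foldl_append_singleton_eq_map
    (fun x => _) (PySem.List.pyRange 0 arr.length 1) []]
  rw [List.nil_append, PySem.List.pyGetD_map_pyRange _ arr.length i 0 hi]
  simp only [dv]
  rw [PySem.List.slice_to arr (by positivity), PySem.List.slice_from arr (by positivity)]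
  have h1 : ((i : Int) + 1).toNat = i + 1 := by omega
  rw [h1]
  have htd := List.sum_take_add_sum_drop arr (i + 1)
  have hlt : (List.take (i+1) arr).length = i + 1 := by simp; omega
  have hld : (List.drop (i+1) arr).length = arr.length - (i+1) := by simp
  rw [hlt, hld]
  have h3 : (0:Int) < ((i+1 : Nat) : Int) := by positivity
  rw [if_pos h3]
  have hc1 : ((i + 1 : Nat) : Int) = (i : Int) + 1 := by push_cast; ring
  have hc2 : ((arr.length - (i + 1) : Nat) : Int) = (arr.length : Int) - (i : Int) - 1 := by
    push_cast [Nat.cast_sub (by omega : i + 1 ≤ arr.length)]; ring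
  have hsum : (List.drop (i + 1) arr).sum = arr.sum - (List.take (i + 1) arr).sum := by omega
  rw [hc1, hc2, hsum]
  congr 1
  by_cases h : (arr.length : Int) - (i : Int) - 1 = 0
  · rw [if_neg (by omega : ¬((arr.length : Int) - (i : Int) - 1 > 0)), if_neg (not_not_intro h)]
  · rw [if_pos (by omega : (arr.length : Int) - (i : Int) - 1 > 0), if_pos h]

-- the loop correspondence: A's argmin pass over res_ equals B's running fold
lemma main_loop (arr : List Int) : ∀ (tail : List Int) (j : Nat) (m bv : Int) (res_ : List Int),
    arr.drop j = tail →
    (∀ i : Nat, i < arr.length → PySem.List.pyGetD res_ (i : Int) 0 = dv arr i) →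
    PySem.List.pyGetD res_ m 0 = bv →
    (PySem.List.pyRange (j : Int) (arr.length : Int) 1).foldl (astep res_) m
      = ((PySem.List.enumerate tail (j : Int)).foldl (bstep arr.length arr.sum)
          ((arr.take j).sum, m, some bv)).2.1 := by
  intro tail
  induction tail with
  | nil =>
    intro j m bv res_ hdrop hres hbv
    have hj : arr.length ≤ j := by
      by_contra h
      have := List.drop_eq_nil_iff.mp hdrop
      omega
    rw [PySem.List.pyRange_one_eq_nil (by exact_mod_cast hj)]
    simp [PySem.List.enumerate]
  | cons x xs ih =>
    intro j m bv res_ hdrop hres hbv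
    have hj : j < arr.length := by
      by_contra h
      rw [List.drop_eq_nil_iff.mpr (by omega)] at hdrop
      simp at hdrop
    have hcd : arr[j] :: arr.drop (j + 1) = x :: xs := by
      rw [List.getElem_cons_drop, hdrop]
    have hx : arr[j] = x := (List.cons_eq_cons.mp hcd).1
    have hxs : arr.drop (j + 1) = xs := (List.cons_eq_cons.mp hcd).2
    rw [PySem.List.pyRange_one_cons (by exact_mod_cast hj), List.foldl_cons,
        PySem.List.enumerate_cons, List.foldl_cons]
    have hpre : (arr.take j).sum + x = (arr.take (j + 1)).sum := by
      rw [List.take_add_one]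
      simp [List.getElem?_eq_getElem hj, hx]
    have hdval : |PySem.Int.floordiv ((arr.take (j+1)).sum) ((j : Int) + 1) -
        (if (arr.length : Int) - (j : Int) - 1 ≠ 0 then
          PySem.Int.floordiv (arr.sum - (arr.take (j+1)).sum) ((arr.length : Int) - (j : Int) - 1)
         else 0)| = dv arr j := by
      simp only [dv]
    have hstepA : astep res_ m (j : Int) = if dv arr j < bv then (j : Int) else m := by
      rw [astep, hres j hj, hbv]
    have hstepB : bstep (arr.length : Int) arr.sum ((arr.take j).sum, m, some bv) ((j : Int), x)
        = ((arr.take (j+1)).sum, if dv arr j < bv then ((j : Int), some (dv arr j)) else (m, some bv)) := by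
      simp only [bstep, hpre]
      rw [hdval]
      by_cases h : dv arr j < bv
      · rw [if_pos h, if_pos h]
      · rw [if_neg h, if_neg h]
    rw [hstepA, hstepB]
    have hcast : ((j : Int) + 1) = ((j + 1 : Nat) : Int) := by push_cast; ring
    by_cases h : dv arr j < bv
    · rw [if_pos h, if_pos h, hcast]
      exact ih (j + 1) (j : Int) (dv arr j) res_ hxs hres (hres j hj)
    · rw [if_neg h, if_neg h, hcast]
      exact ih (j + 1) m bv res_ hxs hres hbv

-- ===== VERDICT (by name: the statement is the Claim_ definition above) =====
theorem average_diff_spec : Claim_equal_average_diff := by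
  intro arr _
  unfold Spec_average_diff
  match arr with
  | [] => rfl
  | [x] => rfl
  | x :: y :: rest =>
    have h2 : ¬(((x :: y :: rest).length : Int) < 2) := by simp
    simp only [average_diff, average_diff_alt]
    rw [if_neg h2]
    rw [PySem.List.enumerate_cons, List.foldl_cons]
    have hbv := resList_pyGetD (x :: y :: rest) 0 (by simp)
    have hfirst : bstep ((x :: y :: rest).length : Int) (x :: y :: rest).sum (0, 0, none) (0, x)
        = (((x :: y :: rest).take 1).sum, 0, some (dv (x :: y :: rest) 0)) := by
      simp [bstep, dv]
    rw [hfirst]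
    have key := main_loop (x :: y :: rest) (y :: rest) 1 0 (dv (x :: y :: rest) 0) _ rfl
      (fun i hi => resList_pyGetD (x :: y :: rest) i hi) hbv
    simpa using key
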